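-- pv_equiv track=rewrite | github.com/Xinshui123/LBP | LBP.py | getHopCnt
-- ===== SOURCE A (Python) =====
-- def getHopCnt(num, P=8):
--     '''
--     :param num:8位的整形数，0-255
--     :return:
--     '''
--     if num > (2 ** P) - 1:
--         num = (2 ** P) - 1
--     elif num < 0:
--         num = 0
--
--     num_b = bin(num)
--     num_b = str(num_b)[2:]
--
--     # 补0
--     if len(num_b) < P:
--         temp = []
--         for i in range(P - len(num_b)):
--             temp.append('0')
--         temp.extend(num_b)
--         num_b = temp
--
--     cnt = 0
--     for i in range(P):
--         if i == 0:
--             former = num_b[-1]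
--         else:
--             former = num_b[i - 1]
--         if former == num_b[i]:
--             pass
--         else:
--             cnt += 1
--
--     return cnt
-- ===== SOURCE B (Python) =====
-- def getHopCnt(num, P=8):
--     mask = (1 << P) - 1
--     if num > mask:
--         num = mask
--     elif num < 0:
--         num = 0
--     rotated = ((num >> 1) | (num << (P - 1))) & mask
--     return (num ^ rotated).bit_count()
-- ===== Notes on version B (the rewrite author's own statement) =====
-- stated objective: faster
-- what changed: Replaces the binary-string construction, zero-padding loop and per-position comparison loop by pure integer bit arithmetic: XOR the clamped value with its circular one-bit rotation and popcount the result.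
-- outside the precondition, e.g. on getHopCnt(5, 0): A returns 0, B raises ValueError; on getHopCnt(-3, -1): A returns 0, B raises ValueError
import Mathlib
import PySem

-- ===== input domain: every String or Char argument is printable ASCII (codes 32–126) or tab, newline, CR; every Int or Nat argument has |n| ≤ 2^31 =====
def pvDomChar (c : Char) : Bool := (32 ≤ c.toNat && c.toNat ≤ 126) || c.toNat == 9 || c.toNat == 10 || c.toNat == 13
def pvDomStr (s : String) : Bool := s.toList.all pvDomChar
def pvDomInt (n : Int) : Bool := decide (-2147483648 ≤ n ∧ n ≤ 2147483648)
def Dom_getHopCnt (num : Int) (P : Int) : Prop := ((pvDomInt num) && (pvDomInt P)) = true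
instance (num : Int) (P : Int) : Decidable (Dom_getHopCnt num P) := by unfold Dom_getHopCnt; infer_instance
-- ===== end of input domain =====

-- B replaces A's binary-string building, padding loop and per-position comparison loop by
-- XOR-with-circular-rotation plus popcount (pure integer bit arithmetic).


-- ===== PORT A =====
def getHopCnt (num : Int) (P : Int) : Int :=
  -- clamp; Python's 2 ** P ported as 2 ^ P.toNat (exact for P ≥ 0; Pre_ gives 1 ≤ P)
  let num1 : Int := if num > 2 ^ P.toNat - 1 then 2 ^ P.toNat - 1
                    else if num < 0 then 0 else num
  -- num_b = str(bin(num))[2:]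
  let numB : List Char := PySem.List.slice (PySem.Int.pyBin num1).toList (some 2) none
  -- zero-padding loop: temp = []; for i in range(P - len(num_b)): temp.append('0'); temp.extend(num_b)
  let numB : List Char :=
    if PySem.List.len numB < P then
      ((PySem.List.pyRange 0 (P - PySem.List.len numB) 1).foldl (fun t _ => t ++ ['0']) []) ++ numB
    else numB
  -- counting loop; num_b[...] ported with pyGetD (all indices are in range under Pre_)
  (PySem.List.pyRange 0 P 1).foldl (fun cnt i =>
    let former : Char := if i = 0 then PySem.List.pyGetD numB (-1) '0'
                         else PySem.List.pyGetD numB (i - 1) '0'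
    if former = PySem.List.pyGetD numB i '0' then cnt else cnt + 1) 0

-- ===== PORT B =====
def getHopCnt_alt (num : Int) (P : Int) : Int :=
  let mask : Int := (1 <<< P.toNat) - 1        -- 1 << P (exact for P ≥ 0; Pre_ gives 1 ≤ P)
  let num1 : Int := if num > mask then mask else if num < 0 then 0 else num
  -- under Pre_, num1 and mask are ≥ 0, so the bit operations are computed in ℕ (Python-exact there)
  let n : Nat := num1.toNat
  let rotated : Nat := ((n >>> 1) ||| (n <<< (P - 1).toNat)) &&& mask.toNat
  ((PySem.Int.bitCount ((n ^^^ rotated : Nat) : Int) : Nat) : Int)   -- (num ^ rotated).bit_count()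

-- ===== PRECONDITION & SPEC =====
-- Pre_ restricts to positive bit-widths P ≥ 1, the function's natural domain: for P ≤ 0 Python A
-- raises TypeError (bin of a float) when num ≥ 2**P - 1 and returns an accidental 0 otherwise,
-- while B's negative shift raises ValueError on all of them.
def Pre_getHopCnt (num : Int) (P : Int) : Prop := 1 ≤ P
instance (num : Int) (P : Int) : Decidable (Pre_getHopCnt num P) := by unfold Pre_getHopCnt; infer_instance
def pvWitness_getHopCnt : Int × Int := (5, 8)

def Spec_getHopCnt (num : Int) (P : Int) (out : Int) : Prop := out = getHopCnt_alt num P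
instance (num : Int) (P : Int) (out : Int) : Decidable (Spec_getHopCnt num P out) := by unfold Spec_getHopCnt; infer_instance

-- ===== CLAIM (what is proved, stated in full; the proofs are below) =====
def Claim_equal_getHopCnt : Prop := ∀ (num : Int) (P : Int), Dom_getHopCnt num P → Pre_getHopCnt num P → Spec_getHopCnt num P (getHopCnt num P)

-- ===== LEMMAS AND PROOFS =====

/-- the character of one bit, as it appears in `bin(...)` -/
def bitChar (b : Bool) : Char := if b then '1' else '0'

/-- the `p`-bit, MSB-first bit list of `n` -/
def bitsL (p n : Nat) : List Char := (List.range p).map (fun i => bitChar (n.testBit (p - 1 - i)))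

/-- 1 if bit `j` of `n` differs from its circular neighbour (bit `j+1 mod p`), else 0 -/
def hopBit (p n j : Nat) : Int :=
  if n.testBit j ≠ n.testBit (if j + 1 = p then 0 else j + 1) then 1 else 0

/-- left-padding `bin(n)` with zeros to width `p` gives the MSB-first bit list -/
lemma padA (p : Nat) (hp : 1 ≤ p) : ∀ n : Nat, n < 2 ^ p →
    List.replicate (p - (Nat.toDigits 2 n).length) '0' ++ Nat.toDigits 2 n = bitsL p n := by
  induction p, hp using Nat.le_induction with
  | base =>
    intro n hn
    interval_cases n <;> decide
  | succ p hp ih =>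
    intro n hn
    by_cases h2 : n < 2
    · -- toDigits is a single char; everything left of the last position is a '0'
      rw [Nat.toDigits_of_lt_base h2]
      have hrange : (List.range (p + 1)).map (fun i => bitChar (n.testBit (p + 1 - 1 - i)))
          = (List.range p).map (fun i => bitChar (n.testBit (p + 1 - 1 - i))) ++ [bitChar (n.testBit 0)] := by
        rw [List.range_succ, List.map_append]
        simp
      have hzero : (List.range p).map (fun i => bitChar (n.testBit (p + 1 - 1 - i)))
          = List.replicate p '0' := by
        have heq : (List.range p).map (fun i => bitChar (n.testBit (p + 1 - 1 - i)))
            = (List.range p).map (fun _ => '0') := by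
          apply List.map_congr_left
          intro i hi
          rw [List.mem_range] at hi
          have : n.testBit (p - i) = false := Nat.testBit_lt_two_pow (by
            calc n < 2 ^ 1 := h2
            _ ≤ 2 ^ (p - i) := Nat.pow_le_pow_right (by norm_num) (by omega))
          simp [this, bitChar]
        rw [heq, List.map_const', List.length_range]
      have hd : [n.digitChar] = [bitChar (n.testBit 0)] := by
        interval_cases n <;> decide
      rw [bitsL, hrange, hzero, hd]
      simp
    · -- n ≥ 2 : peel off the last binary digit
      have hrec := Nat.toDigits_eq_if (b := 2) (n := n) (by norm_num)
      rw [if_neg h2] at hrec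
      rw [hrec]
      have hdiv : n / 2 < 2 ^ p := by
        have : 2 ^ (p + 1) = 2 ^ p * 2 := by ring
        omega
      have hih := ih (n / 2) hdiv
      calc List.replicate (p + 1 - (Nat.toDigits 2 (n / 2) ++ [(n % 2).digitChar]).length) '0'
            ++ (Nat.toDigits 2 (n / 2) ++ [(n % 2).digitChar])
          = (List.replicate (p - (Nat.toDigits 2 (n / 2)).length) '0'
            ++ Nat.toDigits 2 (n / 2)) ++ [(n % 2).digitChar] := by
            rw [← List.append_assoc]
            congr 2
            simp
        _ = bitsL p (n / 2) ++ [(n % 2).digitChar] := by rw [hih]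
        _ = bitsL (p + 1) n := by
            rw [bitsL, bitsL, List.range_succ, List.map_append]
            congr 1
            · apply List.map_congr_left
              intro i hi
              rw [List.mem_range] at hi
              have : p + 1 - 1 - i = (p - 1 - i) + 1 := by omega
              rw [this, Nat.testBit_add_one]
            · have hd : (n % 2).digitChar = bitChar (n.testBit 0) := by
                have := Nat.mod_two_eq_zero_or_one n
                rcases this with h | h <;> (simp [Nat.testBit_zero, h, bitChar]; decide)
              simp [hd]

/-- a 0/1 `countP` over `range p` as a `Finset` sum -/
lemma countP_range_sum (p : Nat) (q : Nat → Bool) :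
    ((List.countP q (List.range p) : Nat) : Int)
      = ∑ k ∈ Finset.range p, (if q k then (1 : Int) else 0) := by
  induction p with
  | zero => simp
  | succ p ih =>
    rw [List.range_succ, List.countP_append, Finset.sum_range_succ, ← ih]
    by_cases h : q p <;> simp [h]

/-- `bit_count` of `x < 2^p` as the sum of its low `p` bits -/
lemma bitCount_sum (p : Nat) : ∀ x : Nat, x < 2 ^ p →
    ((PySem.Int.bitCount (x : Int) : Nat) : Int)
      = ∑ j ∈ Finset.range p, (if x.testBit j then (1 : Int) else 0) := by
  induction p with
  | zero => intro x hx; interval_cases x; simp [PySem.Int.bitCount_zero]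
  | succ p ih =>
    intro x hx
    rcases Nat.eq_zero_or_pos x with rfl | hx0
    · simp [PySem.Int.bitCount_zero, Nat.zero_testBit]
    · rw [PySem.Int.bitCount_natCast hx0, Finset.sum_range_succ']
      have hdiv : x / 2 < 2 ^ p := by
        have : 2 ^ (p + 1) = 2 ^ p * 2 := by ring
        omega
      have hih := ih (x / 2) hdiv
      simp only [Nat.testBit_add_one, Nat.testBit_zero]
      rw [← hih]
      have h2 : x % 2 = 0 ∨ x % 2 = 1 := Nat.mod_two_eq_zero_or_one x
      rcases h2 with h | h <;> simp [h] <;> ring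

/-- A's counting loop over the padded bit list computes the sum of the `hopBit`s -/
lemma A_eq (p n : Nat) (hp : 1 ≤ p) :
    (PySem.List.pyRange 0 (p : Int) 1).foldl (fun cnt i =>
        if (if i = 0 then PySem.List.pyGetD (bitsL p n) (-1) '0'
            else PySem.List.pyGetD (bitsL p n) (i - 1) '0')
           = PySem.List.pyGetD (bitsL p n) i '0' then cnt else cnt + 1) 0
      = ∑ j ∈ Finset.range p, hopBit p n j := by
  have hL : (bitsL p n).length = p := by simp [bitsL]
  have hne : bitsL p n ≠ [] := by
    intro h; rw [h] at hL; simp at hL; omega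
  have hgetN : ∀ k : Nat, k < p →
      PySem.List.pyGetD (bitsL p n) (k : Int) '0' = bitChar (n.testBit (p - 1 - k)) := by
    intro k hk
    rw [PySem.List.pyGetD_natCast, List.getD_eq_getElem _ _ (by omega)]
    simp [bitsL]
  have hlast : PySem.List.pyGetD (bitsL p n) (-1) '0' = bitChar (n.testBit 0) := by
    rw [PySem.List.pyGetD_neg_one _ _ hne, List.getLast_eq_getElem]
    simp only [bitsL, List.length_map, List.length_range, List.getElem_map, List.getElem_range]
    congr 2
    omega
  have hbody : (fun (cnt i : Int) =>
      if (if i = 0 then PySem.List.pyGetD (bitsL p n) (-1) '0'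
          else PySem.List.pyGetD (bitsL p n) (i - 1) '0')
         = PySem.List.pyGetD (bitsL p n) i '0' then cnt else cnt + 1)
      = (fun (cnt i : Int) =>
      if ¬ ((if i = 0 then PySem.List.pyGetD (bitsL p n) (-1) '0'
          else PySem.List.pyGetD (bitsL p n) (i - 1) '0')
         = PySem.List.pyGetD (bitsL p n) i '0') then cnt + 1 else cnt) := by
    funext cnt i
    by_cases h : (if i = 0 then PySem.List.pyGetD (bitsL p n) (-1) '0'
          else PySem.List.pyGetD (bitsL p n) (i - 1) '0')
         = PySem.List.pyGetD (bitsL p n) i '0' <;> simp [h]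
  rw [hbody, PySem.List.foldl_ite_add_one, PySem.List.pyRange_one]
  simp only [sub_zero, Int.toNat_natCast, zero_add, List.countP_map]
  rw [countP_range_sum]
  simp only [Function.comp_apply]
  have hterm : ∀ k ∈ Finset.range p,
      (if decide (¬ ((if (k : Int) = 0 then PySem.List.pyGetD (bitsL p n) (-1) '0'
          else PySem.List.pyGetD (bitsL p n) ((k : Int) - 1) '0')
         = PySem.List.pyGetD (bitsL p n) (k : Int) '0'))
        then (1:Int) else 0) = hopBit p n (p - 1 - k) := by
    intro k hk
    rw [Finset.mem_range] at hk
    by_cases hk0 : k = 0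
    · subst hk0
      have hx0 : PySem.List.pyGetD (bitsL p n) (0 : Int) '0' = bitChar (n.testBit (p - 1)) := by
        have h := hgetN 0 (by omega)
        simpa using h
      cases h1 : n.testBit 0 <;> cases h2 : n.testBit (p - 1) <;>
        simp [hlast, hx0, h1, h2, hopBit, bitChar, show p - 1 - 0 = p - 1 by omega,
          show p - 1 + 1 = p by omega]
    · have hk0' : ¬ ((k : Int) = 0) := by exact_mod_cast hk0
      have hcast : ((k : Int) - 1) = (((k - 1 : Nat)) : Int) := by omega
      have hprev := hgetN (k - 1) (by omega)
      have hcur := hgetN k hk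
      have h1 : p - 1 - (k - 1) = p - k := by omega
      have h2 : p - 1 - k + 1 = p - k := by omega
      cases hb1 : n.testBit (p - k) <;> cases hb2 : n.testBit (p - 1 - k) <;>
        simp [hk0, hcast, hprev, hcur, hopBit, bitChar, h1, h2, hb1, hb2,
          show ¬ (p - k = p) by omega]
  exact (Finset.sum_congr rfl hterm).trans (Finset.sum_range_reflect _ _)

/-- B's xor-with-rotation popcount computes the same sum of `hopBit`s -/
lemma B_eq (p n : Nat) (hp : 1 ≤ p) (hn : n < 2 ^ p) :
    ((PySem.Int.bitCount ((n ^^^ (((n >>> 1) ||| (n <<< (p - 1))) &&& (2 ^ p - 1)) : Nat) : Int) : Nat) : Int)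
      = ∑ j ∈ Finset.range p, hopBit p n j := by
  set rot : Nat := ((n >>> 1) ||| (n <<< (p - 1))) &&& (2 ^ p - 1) with hrot
  have hrotlt : rot < 2 ^ p := by
    have h1 : rot ≤ 2 ^ p - 1 := Nat.and_le_right
    have h2 : 0 < 2 ^ p := by positivity
    omega
  have hx : (n ^^^ rot) < 2 ^ p := Nat.xor_lt_two_pow hn hrotlt
  rw [bitCount_sum p _ hx]
  apply Finset.sum_congr rfl
  intro j hj
  rw [Finset.mem_range] at hj
  have hrotbit : rot.testBit j = n.testBit (if j + 1 = p then 0 else j + 1) := by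
    rw [hrot]
    simp only [Nat.testBit_and, Nat.testBit_two_pow_sub_one, Nat.testBit_or,
      Nat.testBit_shiftRight, Nat.testBit_shiftLeft]
    by_cases hje : j + 1 = p
    · have h1 : n.testBit (1 + j) = false :=
        Nat.testBit_lt_two_pow (by rw [show 1 + j = p by omega]; exact hn)
      have h2 : p - 1 ≤ j := by omega
      have h3 : j - (p - 1) = 0 := by omega
      simp [hje, h1, h2, h3, hj]
    · have h3 : 1 + j = j + 1 := by omega
      simp [hje, h3, hj, show ¬ (j ≥ p - 1) by omega]
  rw [Nat.testBit_xor, hrotbit, hopBit]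
  cases hb1 : n.testBit j <;> cases hb2 : n.testBit (if j + 1 = p then 0 else j + 1) <;> simp

-- ===== VERDICT (by name: the statement is the Claim_ definition above) =====
theorem getHopCnt_spec : Claim_equal_getHopCnt := by
  intro num P _ hPre
  unfold Pre_getHopCnt at hPre
  unfold Spec_getHopCnt getHopCnt getHopCnt_alt
  obtain ⟨p, rfl⟩ : ∃ p : Nat, P = (p : Int) := ⟨P.toNat, (Int.toNat_of_nonneg (by omega)).symm⟩
  have hp : 1 ≤ p := by exact_mod_cast hPre
  have h2p : (1:Int) ≤ 2 ^ p := one_le_pow₀ (by norm_num)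
  simp only [Int.toNat_natCast]
  have hmask : (((1 <<< p : Nat) : Int)) - 1 = 2 ^ p - 1 := by
    rw [Nat.shiftLeft_eq]
    push_cast
    ring
  rw [hmask]
  set c : Int := if num > 2 ^ p - 1 then 2 ^ p - 1 else if num < 0 then 0 else num with hc
  have hc0 : 0 ≤ c := by rw [hc]; split_ifs <;> omega
  have hcm : c ≤ 2 ^ p - 1 := by rw [hc]; split_ifs <;> omega
  obtain ⟨n, hn'⟩ : ∃ n : Nat, c = (n : Int) := ⟨c.toNat, (Int.toNat_of_nonneg hc0).symm⟩
  have hn : n < 2 ^ p := by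
    have : ((2:Int) ^ p) = ((2 ^ p : Nat) : Int) := by push_cast; ring
    omega
  rw [hn']
  -- B-side index bookkeeping
  have hB1 : ((n : Int)).toNat = n := Int.toNat_natCast n
  have hB2 : (((p : Int)) - 1).toNat = p - 1 := by omega
  have hB3 : ((2:Int) ^ p - 1).toNat = 2 ^ p - 1 := by
    have : ((2:Int) ^ p) = ((2 ^ p : Nat) : Int) := by push_cast; ring
    omega
  rw [hB1, hB2, hB3]
  -- A side: bin(num)[2:] is the binary digit list
  have hbin : PySem.List.slice (PySem.Int.pyBin (n : Int)).toList (some 2) none = Nat.toDigits 2 n := by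
    rw [PySem.Int.toList_pyBin]
    unfold PySem.Int.toBinChars0b
    rw [if_neg (by omega)]
    rw [show (2:Int) = ((2:Nat):Int) from rfl, PySem.List.slice_from_natCast]
    simp
  rw [hbin]
  -- A side: padding gives the p-bit MSB-first bit list
  have hlen : (Nat.toDigits 2 n).length ≤ p := Nat.toDigits_length 2 n p (by omega) hn
  have hpad : (if PySem.List.len (Nat.toDigits 2 n) < (p : Int) then
      ((PySem.List.pyRange 0 ((p : Int) - PySem.List.len (Nat.toDigits 2 n)) 1).foldl
        (fun t _ => t ++ ['0']) []) ++ Nat.toDigits 2 n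
    else Nat.toDigits 2 n) = bitsL p n := by
    rw [PySem.List.len_eq]
    by_cases hl : ((Nat.toDigits 2 n).length : Int) < (p : Int)
    · rw [if_pos hl]
      have hfold : (PySem.List.pyRange 0 ((p : Int) - ((Nat.toDigits 2 n).length : Int)) 1).foldl
          (fun t _ => t ++ ['0']) ([] : List Char)
          = List.replicate (p - (Nat.toDigits 2 n).length) '0' := by
        rw [PySem.List.foldl_append_singleton_eq_map, List.map_const',
          PySem.List.length_pyRange_one]
        simp only [List.nil_append]
        congr 1
        omega
      rw [hfold, padA p hp n hn]
    · rw [if_neg hl]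
      have h0 : p - (Nat.toDigits 2 n).length = 0 := by omega
      rw [← padA p hp n hn, h0]
      simp
  rw [hpad]
  rw [A_eq p n hp, B_eq p n hp hn]
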